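-- pv_equiv track=rewrite | github.com/mindis/platypus-qa | platypus_qa/analyzer/grammatical_analyzer.py | _nodes_before
-- ===== SOURCE A (Python) =====
-- def _nodes_before(nodes, node, include: bool = False):
--     """
--     Returns the nodes in nodes before node (node is included if, and only if, include = True)
--     """
--     result = []
--     for current in nodes:
--         if current == node:
--             if include:
--                 result.append(current)
--             break
--         else:
--             result.append(current)
--     return result
-- ===== SOURCE B (Python) =====
-- def _nodes_before(nodes, node, include: bool = False):
--     lst = list(nodes)
--     i = next((idx for idx, c in enumerate(lst) if c == node), None)
--     if i is None:
--         return lst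
--     return lst[:i + 1] if include else lst[:i]
-- ===== Notes on version B (the rewrite author's own statement) =====
-- stated objective: idiomatic
-- what changed: Replaces A's accumulate-until-break loop with a two-phase locate-first-index-then-slice computation (find the first matching position, then return a prefix slice of the materialised list).
import Mathlib
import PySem

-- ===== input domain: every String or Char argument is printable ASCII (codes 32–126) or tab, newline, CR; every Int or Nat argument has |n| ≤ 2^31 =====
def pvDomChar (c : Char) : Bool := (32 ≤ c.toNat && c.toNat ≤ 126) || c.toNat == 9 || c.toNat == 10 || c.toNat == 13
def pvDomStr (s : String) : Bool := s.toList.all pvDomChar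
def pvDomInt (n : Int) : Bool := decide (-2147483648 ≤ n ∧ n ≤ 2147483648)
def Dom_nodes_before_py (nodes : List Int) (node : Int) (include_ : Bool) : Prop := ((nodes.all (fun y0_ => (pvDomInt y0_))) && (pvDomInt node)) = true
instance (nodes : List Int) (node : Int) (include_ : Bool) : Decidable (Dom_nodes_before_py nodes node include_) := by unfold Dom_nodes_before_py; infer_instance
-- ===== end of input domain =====

-- B collects the same nodes by locating the first matching index and slicing, instead of A's accumulate-until-break loop; objective: idiomatic, same cost.

-- ===== PORT A =====
-- A's for-loop with break: structural recursion accumulating elements until the first match.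
def nodes_before_go (node : Int) (include_ : Bool) : List Int → List Int
  | [] => []
  | current :: rest =>
      if current == node then (if include_ then [current] else [])
      else current :: nodes_before_go node include_ rest

def nodes_before_py (nodes : List Int) (node : Int) (include_ : Bool) : List Int :=
  nodes_before_go node include_ nodes

-- ===== PORT B =====
-- B: find first index of a match (none if absent), then take a prefix slice.
def nodes_before_py_alt (nodes : List Int) (node : Int) (include_ : Bool) : List Int :=
  match List.findIdx? (fun c => c == node) nodes with
  | none => nodes
  | some i => PySem.List.slice nodes none (some (if include_ then (i : Int) + 1 else (i : Int)))

-- ===== PRECONDITION & SPEC =====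
def Spec_nodes_before_py (nodes : List Int) (node : Int) (include_ : Bool) (out : List Int) : Prop := out = nodes_before_py_alt nodes node include_
instance (nodes : List Int) (node : Int) (include_ : Bool) (out : List Int) : Decidable (Spec_nodes_before_py nodes node include_ out) := by unfold Spec_nodes_before_py; infer_instance

-- ===== CLAIM (what is proved, stated in full; the proofs are below) =====
def Claim_equal_nodes_before_py : Prop := ∀ (nodes : List Int) (node : Int) (include_ : Bool), Dom_nodes_before_py nodes node include_ → Spec_nodes_before_py nodes node include_ (nodes_before_py nodes node include_)

-- ===== LEMMAS AND PROOFS =====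
lemma slice_to_nat (xs : List Int) (n : ℕ) :
    PySem.List.slice xs none (some (n : Int)) = xs.take n :=
  PySem.List.slice_to_natCast xs n

lemma slice_to_zero (xs : List Int) : PySem.List.slice xs none (some 0) = [] :=
  slice_to_nat xs 0

lemma slice_to_one (xs : List Int) : PySem.List.slice xs none (some 1) = xs.take 1 :=
  slice_to_nat xs 1

lemma slice_cast_succ (xs : List Int) (i : ℕ) :
    PySem.List.slice xs none (some ((i : Int) + 1)) = xs.take (i + 1) := by
  rw [show (i : Int) + 1 = ((i + 1 : ℕ) : Int) by push_cast; ring]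
  exact slice_to_nat xs (i + 1)

lemma slice_cast_succ2 (xs : List Int) (i : ℕ) :
    PySem.List.slice xs none (some ((i : Int) + 1 + 1)) = xs.take (i + 2) := by
  rw [show (i : Int) + 1 + 1 = ((i + 2 : ℕ) : Int) by push_cast; ring]
  exact slice_to_nat xs (i + 2)

lemma nodes_before_eq (nodes : List Int) (node : Int) (include_ : Bool) :
    nodes_before_go node include_ nodes = nodes_before_py_alt nodes node include_ := by
  induction nodes with
  | nil => simp [nodes_before_go, nodes_before_py_alt]
  | cons c rest ih =>
      unfold nodes_before_go nodes_before_py_alt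
      rw [List.findIdx?_cons]
      by_cases h : (c == node) = true
      · rw [if_pos h]
        simp only [h]
        cases include_
        · simp [slice_to_zero]
        · simp [slice_to_one, List.take_succ_cons]
      · have hb : (c == node) = false := by simpa using h
        rw [if_neg h]
        simp only [hb]
        rw [ih]
        unfold nodes_before_py_alt
        cases hf : List.findIdx? (fun x => x == node) rest with
        | none => simp
        | some i =>
            cases include_ <;>
              simp [slice_cast_succ, slice_cast_succ2, List.take_succ_cons]

-- ===== VERDICT (by name: the statement is the Claim_ definition above) =====
theorem nodes_before_py_spec : Claim_equal_nodes_before_py := by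
  intro nodes node include_ _
  unfold Spec_nodes_before_py nodes_before_py
  exact nodes_before_eq nodes node include_
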